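-- pv_equiv track=rewrite | github.com/MrBrantCode/unitest_baseline | mut_generate/mist_train_cf/cf_57500/solution.py | calculate_synonyms
-- ===== SOURCE A (Python) =====
-- from collections import defaultdict
--
-- def calculate_synonyms(lexicon, synonym_pairs):
--     # Create a graph from lexicon and synonym pairs
--     graph = defaultdict(set)
--     for word, synonyms in lexicon.items():
--         for synonym in synonyms:
--             graph[word].add(synonym)
--             graph[synonym].add(word)
--     for word1, word2 in synonym_pairs:
--         graph[word1].add(word2)
--         graph[word2].add(word1)
--
--     # Perform DFS on each word of the graph to count synonyms
--     result = {}
--     for word in graph: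
--         visited = set()
--         synonyms = set()
--         stack = [word]
--         while stack:
--             current_word = stack.pop()
--             if current_word not in visited:
--                 visited.add(current_word)
--                 synonyms.add(current_word)
--                 stack.extend(synonym for synonym in graph[current_word] if synonym not in visited)
--         # Remove the word itself from the synonym count
--         synonyms.remove(word)
--         result[word] = len(synonyms)
--
--     return result
-- ===== SOURCE B (Python) =====
-- from collections import defaultdict
--
-- def calculate_synonyms(lexicon, synonym_pairs):
--     # Build the same undirected graph
--     graph = defaultdict(set)
--     for word, synonyms in lexicon.items():
--         for synonym in synonyms:
--             graph[word].add(synonym)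
--             graph[synonym].add(word)
--     for word1, word2 in synonym_pairs:
--         graph[word1].add(word2)
--         graph[word2].add(word1)
--
--     # One BFS per *component* (not per word): label every member with the
--     # component size at once.
--     comp_size = {}
--     for word in graph:
--         if word not in comp_size:
--             comp = [word]
--             seen = {word}
--             i = 0
--             while i < len(comp):
--                 for v in graph[comp[i]]:
--                     if v not in seen:
--                         seen.add(v)
--                         comp.append(v)
--                 i += 1
--             for v in comp:
--                 comp_size[v] = len(comp)
--
--     return {word: comp_size[word] - 1 for word in graph}
-- ===== Notes on version B (the rewrite author's own statement) =====
-- stated objective: faster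
-- what changed: A reruns a full DFS from every word of the graph; B traverses each connected component once (BFS with an index pointer) and assigns size-1 to all its members, then reads the sizes back in graph key order.
import Mathlib
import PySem

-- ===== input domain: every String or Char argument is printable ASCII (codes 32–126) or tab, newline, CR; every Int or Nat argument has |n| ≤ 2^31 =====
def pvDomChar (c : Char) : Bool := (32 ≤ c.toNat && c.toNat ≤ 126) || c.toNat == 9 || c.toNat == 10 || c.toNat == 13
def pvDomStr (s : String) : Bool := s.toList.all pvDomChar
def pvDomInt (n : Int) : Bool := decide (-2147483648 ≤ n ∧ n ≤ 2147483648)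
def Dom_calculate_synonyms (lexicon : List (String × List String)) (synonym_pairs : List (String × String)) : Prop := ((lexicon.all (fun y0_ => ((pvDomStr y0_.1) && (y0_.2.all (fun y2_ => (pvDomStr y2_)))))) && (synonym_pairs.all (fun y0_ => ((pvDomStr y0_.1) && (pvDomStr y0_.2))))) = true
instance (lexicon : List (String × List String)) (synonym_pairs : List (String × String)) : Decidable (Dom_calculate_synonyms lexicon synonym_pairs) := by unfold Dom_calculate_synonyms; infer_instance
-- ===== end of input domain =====

-- B replaces A's per-word DFS recount by a single traversal per connected component
-- (objective: faster — one BFS labels the whole component with size-1 at once).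

-- universe of vertices ever mentioned in the dict (keys and all adjacency members)
def pvUniv (g : PySem.Dict String (PySem.Set String)) : List String :=
  g.keys ++ g.values.flatten

def pvAdj (g : PySem.Dict String (PySem.Set String)) (w : String) : PySem.Set String :=
  g.getD w []

theorem pvAdj_subset_univ (g : PySem.Dict String (PySem.Set String)) (u x : String)
    (hx : x ∈ pvAdj g u) : x ∈ pvUniv g := by
  unfold pvAdj PySem.Dict.getD at hx
  unfold pvUniv
  cases hu : g.get? u with
  | none => rw [hu] at hx; simp at hx
  | some s =>
    rw [hu] at hx
    refine List.mem_append_right _ ?_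
    refine List.mem_flatten.mpr ⟨s, ?_, hx⟩
    -- s is one of the dict's values
    unfold PySem.Dict.get? at hu
    obtain ⟨p, hp, hps⟩ := Option.map_eq_some_iff.mp hu
    unfold PySem.Dict.values
    exact List.mem_map.mpr ⟨p, List.mem_of_find?_eq_some hp, hps⟩

theorem pvAdj_eq_nil_of_not_mem_univ (g : PySem.Dict String (PySem.Set String)) (u : String)
    (hu : u ∉ pvUniv g) : pvAdj g u = [] := by
  unfold pvAdj
  rcases h : g.get? u with _ | s
  · simp [PySem.Dict.getD, h]
  · exfalso
    apply hu
    unfold pvUniv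
    refine List.mem_append_left _ ?_
    unfold PySem.Dict.get? at h
    obtain ⟨p, hp, hps⟩ := Option.map_eq_some_iff.mp h
    unfold PySem.Dict.keys
    have hpu : p.1 = u := by simpa using List.find?_some hp
    exact List.mem_map.mpr ⟨p, List.mem_of_find?_eq_some hp, hpu⟩

-- strict decrease of an unvisited-count when the predicate strengthens and one element drops out
theorem pvFilterLt {l : List String} {p q : String → Bool} (himp : ∀ x, q x = true → p x = true)
    (x : String) (hx : x ∈ l) (hpx : p x = true) (hqx : q x = false) :
    (l.filter q).length < (l.filter p).length := by
  have h1 : l.filter q = (l.filter p).filter q := by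
    rw [List.filter_filter]
    apply List.filter_congr
    intro a _
    cases hq : q a
    · simp
    · simp [himp a hq]
  rw [h1]
  exact List.length_filter_lt_length_iff_exists.mpr ⟨x, List.mem_filter.mpr ⟨hx, hpx⟩, by simp [hqx]⟩

theorem pvFilterCongrNotMem {l : List String} (v : List String) (c : String) (hc : c ∉ l) :
    (l.filter fun k => !(PySem.Set.add v c).contains k).length
      = (l.filter fun k => !v.contains k).length := by
  congr 1
  apply List.filter_congr
  intro a ha
  have hne : a ≠ c := fun h => hc (h ▸ ha)
  unfold PySem.Set.add
  split
  · rfl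
  · simp [hne]

-- ===== PORT A =====
-- graph[a].add(b); graph[b].add(a)  (defaultdict(set): missing key reads as empty set)
def pvAddEdge (g : PySem.Dict String (PySem.Set String)) (a b : String) :
    PySem.Dict String (PySem.Set String) :=
  (g.modify a [] (fun s => PySem.Set.add s b)).modify b [] (fun s => PySem.Set.add s a)

-- both loops that build the graph (shared verbatim by A and B)
def pvBuildGraph (lexicon : List (String × List String)) (synonym_pairs : List (String × String)) :
    PySem.Dict String (PySem.Set String) :=
  let g := lexicon.foldl (fun g p => p.2.foldl (fun g s => pvAddEdge g p.1 s) g) PySem.Dict.empty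
  synonym_pairs.foldl (fun g p => pvAddEdge g p.1 p.2) g

-- the while-stack DFS of A; the pair is (visited, synonyms), Python list end = Lean list head
def pvDfsA (g : PySem.Dict String (PySem.Set String)) (stack : List String)
    (visited synonyms : PySem.Set String) : PySem.Set String × PySem.Set String :=
  match stack with
  | [] => (visited, synonyms)
  | c :: rest =>
    if hc : visited.contains c then
      pvDfsA g rest visited synonyms
    else
      pvDfsA g (((pvAdj g c).filter (fun s => !(PySem.Set.add visited c).contains s)).reverse ++ rest)
        (PySem.Set.add visited c) (PySem.Set.add synonyms c)
  termination_by (((pvUniv g).filter (fun k => !visited.contains k)).length, stack.length)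
  decreasing_by
  · exact Prod.Lex.right _ (by simp)
  · by_cases hcu : c ∈ pvUniv g
    · apply Prod.Lex.left
      refine pvFilterLt ?_ c hcu (by simp; exact fun h => hc (List.contains_iff_mem.mpr h)) ?_
      · intro x hx
        simp only [Bool.not_eq_true'] at hx ⊢
        unfold PySem.Set.add at hx
        rw [if_neg hc] at hx
        simp at hx ⊢
        tauto
      · unfold PySem.Set.add
        rw [if_neg hc]
        simp
    · rw [pvAdj_eq_nil_of_not_mem_univ g c hcu, pvFilterCongrNotMem _ c hcu]
      exact Prod.Lex.right _ (by simp)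

def calculate_synonyms (lexicon : List (String × List String)) (synonym_pairs : List (String × String)) : List (String × Int) :=
  let g := pvBuildGraph lexicon synonym_pairs
  -- for word in graph: DFS, then synonyms.remove(word) — word is always visited first, so the
  -- remove never raises and Set.discard is exact here; result dict returned as its items
  (g.keys.foldl (fun res w =>
      let p := pvDfsA g [w] [] []
      res.insert w ((PySem.Set.discard p.2 w).length : Int))
    PySem.Dict.empty).items


-- the inner 'for v in graph[u]' loop appends the same new elements to comp and seen
theorem pvFoldStep_spec (l c : List String) (s : PySem.Set String) :
    ∃ nw : List String,
      (l.foldl (fun (cs : List String × PySem.Set String) v =>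
          if cs.2.contains v then cs else (cs.1 ++ [v], PySem.Set.add cs.2 v)) (c, s))
        = (c ++ nw, s ++ nw)
      ∧ (∀ x ∈ nw, x ∈ l ∧ x ∉ s)
      ∧ (∀ x ∈ l, x ∈ s ∨ x ∈ nw)
      ∧ nw.Nodup := by
  induction l generalizing c s with
  | nil => exact ⟨[], by simp⟩
  | cons v rest ih =>
    simp only [List.foldl_cons]
    by_cases hv : s.contains v
    · rw [if_pos hv]
      obtain ⟨nw, h1, h2, h3, h4⟩ := ih c s
      have hvm : v ∈ s := List.contains_iff_mem.mp hv
      refine ⟨nw, h1, fun x hx => ⟨List.mem_cons_of_mem _ (h2 x hx).1, (h2 x hx).2⟩, ?_, h4⟩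
      intro x hx
      rcases List.mem_cons.mp hx with rfl | hx
      · exact Or.inl hvm
      · exact h3 x hx
    · rw [if_neg hv]
      have hvm : v ∉ s := fun h => hv (List.contains_iff_mem.mpr h)
      have hadd : PySem.Set.add s v = s ++ [v] := by unfold PySem.Set.add; rw [if_neg hv]
      rw [hadd]
      obtain ⟨nw, h1, h2, h3, h4⟩ := ih (c ++ [v]) (s ++ [v])
      refine ⟨v :: nw, ?_, ?_, ?_, ?_⟩
      · rw [h1]; simp
      · intro x hx
        rcases List.mem_cons.mp hx with rfl | hx
        · exact ⟨List.mem_cons_self .., hvm⟩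
        · obtain ⟨hxl, hxs⟩ := h2 x hx
          exact ⟨List.mem_cons_of_mem _ hxl, fun h => hxs (List.mem_append_left _ h)⟩
      · intro x hx
        rcases List.mem_cons.mp hx with rfl | hx
        · exact Or.inr (List.mem_cons_self ..)
        · rcases h3 x hx with h | h
          · rcases List.mem_append.mp h with h | h
            · exact Or.inl h
            · simp at h; subst h; exact Or.inr (List.mem_cons_self ..)
          · exact Or.inr (List.mem_cons_of_mem _ h)
      · refine List.nodup_cons.mpr ⟨fun h => ?_, h4⟩
        exact (h2 v h).2 (List.mem_append_right _ (by simp))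

-- ===== PORT B =====
-- the per-component BFS of B: comp is the growing list, i the read pointer;
-- the inner 'for v in graph[comp[i]]' is the foldl over the adjacency set
def pvBfs (g : PySem.Dict String (PySem.Set String)) (comp : List String)
    (seen : PySem.Set String) (i : Nat) : List String :=
  if hi : i < comp.length then
    let st := (pvAdj g comp[i]).foldl
      (fun (cs : List String × PySem.Set String) v =>
        if cs.2.contains v then cs else (cs.1 ++ [v], PySem.Set.add cs.2 v))
      (comp, seen)
    pvBfs g st.1 st.2 (i + 1)
  else comp
  termination_by (((pvUniv g).filter (fun k => !seen.contains k)).length, comp.length - i)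
  decreasing_by
    obtain ⟨nw, h1, h2, h3, h4⟩ := pvFoldStep_spec (pvAdj g comp[i]) comp seen
    simp only [dite_eq_ite]
    rw [h1]
    cases nw with
    | nil => simpa using Prod.Lex.right _ (by omega)
    | cons x nw' =>
      apply Prod.Lex.left
      refine pvFilterLt ?_ x (pvAdj_subset_univ g comp[i] x (h2 x (by simp)).1) ?_ ?_
      · intro k hk
        simp at hk ⊢
        tauto
      · simpa using (h2 x (by simp)).2
      · simp

def calculate_synonyms_alt (lexicon : List (String × List String)) (synonym_pairs : List (String × String)) : List (String × Int) :=
  let g := pvBuildGraph lexicon synonym_pairs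
  let sizes := g.keys.foldl (fun cs w =>
      if cs.contains w then cs
      else
        let comp := pvBfs g [w] [w] 0
        comp.foldl (fun cs v => cs.insert v (comp.length : Int)) cs)
    PySem.Dict.empty
  -- comp_size[word] never misses (every graph key is labelled; proved below), so getD is exact
  (g.keys.foldl (fun r w => r.insert w (sizes.getD w 0 - 1)) PySem.Dict.empty).items

-- ===== PRECONDITION & SPEC =====
def Spec_calculate_synonyms (lexicon : List (String × List String)) (synonym_pairs : List (String × String)) (out : List (String × Int)) : Prop := out = calculate_synonyms_alt lexicon synonym_pairs
instance (lexicon : List (String × List String)) (synonym_pairs : List (String × String)) (out : List (String × Int)) : Decidable (Spec_calculate_synonyms lexicon synonym_pairs out) := by unfold Spec_calculate_synonyms; infer_instance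

-- ===== CLAIM (what is proved, stated in full; the proofs are below) =====
def Claim_equal_calculate_synonyms : Prop := ∀ (lexicon : List (String × List String)) (synonym_pairs : List (String × String)), Dom_calculate_synonyms lexicon synonym_pairs → Spec_calculate_synonyms lexicon synonym_pairs (calculate_synonyms lexicon synonym_pairs)

-- ===== LEMMAS AND PROOFS =====
def pvReach (g : PySem.Dict String (PySem.Set String)) : String → String → Prop :=
  Relation.ReflTransGen (fun a b => b ∈ pvAdj g a)

theorem pvDfsEscape (g : PySem.Dict String (PySem.Set String)) (V S : List String)
    (hInv : ∀ u ∈ V, ∀ v ∈ pvAdj g u, v ∈ V ∨ v ∈ S)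
    (s x : String) (hs : s ∈ V) (hr : pvReach g s x) :
    x ∈ V ∨ ∃ t ∈ S, pvReach g t x := by
  have H : ∀ (a : String), pvReach g a x → a ∈ V → (x ∈ V ∨ ∃ t ∈ S, pvReach g t x) := by
    intro a h
    induction h using Relation.ReflTransGen.head_induction_on with
    | refl => exact fun hx => Or.inl hx
    | head h' hrest ih =>
      intro ha
      rcases hInv _ ha _ h' with hv | hs'
      · exact ih hv
      · exact Or.inr ⟨_, hs', hrest⟩
  exact H s hr hs

theorem pvDfsA_spec (g : PySem.Dict String (PySem.Set String)) :
    ∀ (stack : List String) (visited synonyms : PySem.Set String), visited.Nodup →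
    (∀ u ∈ visited, ∀ v ∈ pvAdj g u, v ∈ visited ∨ v ∈ stack) →
    ((pvDfsA g stack visited synonyms).1.Nodup ∧
      ∀ x, (x ∈ (pvDfsA g stack visited synonyms).1 ↔
        x ∈ visited ∨ ∃ s ∈ stack, pvReach g s x)) := by
  intro stack visited synonyms
  fun_induction pvDfsA g stack visited synonyms with
  | case1 visited synonyms =>
    intro hnd hInv
    exact ⟨hnd, fun x => by simp⟩
  | case2 visited synonyms c rest hc ih =>
    intro hnd hInv
    have hcm : c ∈ visited := List.contains_iff_mem.mp hc
    have hInv' : ∀ u ∈ visited, ∀ v ∈ pvAdj g u, v ∈ visited ∨ v ∈ rest := by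
      intro u hu v hv
      rcases hInv u hu v hv with h | h
      · exact Or.inl h
      · rcases List.mem_cons.mp h with rfl | h
        · exact Or.inl hcm
        · exact Or.inr h
    obtain ⟨ihn, ihm⟩ := ih hnd hInv'
    refine ⟨ihn, fun x => ?_⟩
    rw [ihm x]
    constructor
    · rintro (h | ⟨s, hs, hr⟩)
      · exact Or.inl h
      · exact Or.inr ⟨s, List.mem_cons_of_mem _ hs, hr⟩
    · rintro (h | ⟨s, hs, hr⟩)
      · exact Or.inl h
      · rcases List.mem_cons.mp hs with rfl | hs
        · exact pvDfsEscape g visited rest hInv' s x hcm hr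
        · exact Or.inr ⟨s, hs, hr⟩
  | case3 visited synonyms c rest hc ih =>
    intro hnd hInv
    have hcm : c ∉ visited := fun h => hc (List.contains_iff_mem.mpr h)
    have hadd : PySem.Set.add visited c = visited ++ [c] := by
      unfold PySem.Set.add; rw [if_neg hc]
    have hnd' : List.Nodup (PySem.Set.add visited c) := by
      rw [hadd]
      refine List.Nodup.append hnd (List.nodup_singleton c) ?_
      intro a ha hb
      simp only [List.mem_singleton] at hb
      exact hcm (hb ▸ ha)
    have hInv' : ∀ u ∈ PySem.Set.add visited c, ∀ v ∈ pvAdj g u,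
        v ∈ PySem.Set.add visited c ∨
          v ∈ (List.filter (fun s => !(PySem.Set.add visited c).contains s) (pvAdj g c)).reverse ++ rest := by
      intro u hu v hv
      rw [hadd] at hu
      rcases List.mem_append.mp hu with hu | hu
      · rcases hInv u hu v hv with h | h
        · exact Or.inl (by rw [hadd]; exact List.mem_append_left _ h)
        · rcases List.mem_cons.mp h with rfl | h
          · exact Or.inl (by rw [hadd]; exact List.mem_append_right _ (by simp))
          · exact Or.inr (List.mem_append_right _ h)
      · simp only [List.mem_singleton] at hu
        rw [hu] at hv
        by_cases hvv : v ∈ PySem.Set.add visited c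
        · exact Or.inl hvv
        · refine Or.inr (List.mem_append_left _ (List.mem_reverse.mpr ?_))
          refine List.mem_filter.mpr ⟨hv, by simpa [List.contains_iff_mem] using hvv⟩
    obtain ⟨ihn, ihm⟩ := ih hnd' hInv'
    refine ⟨ihn, fun x => ?_⟩
    rw [ihm x]
    constructor
    · rintro (h | ⟨s, hs, hr⟩)
      · rw [hadd] at h
        rcases List.mem_append.mp h with h | h
        · exact Or.inl h
        · simp only [List.mem_singleton] at h
          subst h
          exact Or.inr ⟨x, List.mem_cons_self .., Relation.ReflTransGen.refl⟩
      · rcases List.mem_append.mp hs with hs | hs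
        · have hsc : s ∈ pvAdj g c := (List.mem_filter.mp (List.mem_reverse.mp hs)).1
          exact Or.inr ⟨c, List.mem_cons_self .., Relation.ReflTransGen.head hsc hr⟩
        · exact Or.inr ⟨s, List.mem_cons_of_mem _ hs, hr⟩
    · rintro (h | ⟨s, hs, hr⟩)
      · exact Or.inl (by rw [hadd]; exact List.mem_append_left _ h)
      · rcases List.mem_cons.mp hs with rfl | hs
        · exact pvDfsEscape g _ _ hInv' s x (by rw [hadd]; simp) hr
        · exact Or.inr ⟨s, List.mem_append_right _ hs, hr⟩

theorem pvDfsA_snd (g : PySem.Dict String (PySem.Set String)) :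
    ∀ (stack : List String) (v s : PySem.Set String), s = v →
      (pvDfsA g stack v s).2 = (pvDfsA g stack v s).1 := by
  intro stack v s
  fun_induction pvDfsA g stack v s with
  | case1 v s => intro h; simpa using h
  | case2 v s c rest hc ih => exact ih
  | case3 v s c rest hc ih =>
    intro h
    exact ih (by rw [h])

theorem pvDfs_from (g : PySem.Dict String (PySem.Set String)) (w : String) :
    (pvDfsA g [w] [] []).1.Nodup ∧ (∀ x, x ∈ (pvDfsA g [w] [] []).1 ↔ pvReach g w x) := by
  obtain ⟨hn, hm⟩ := pvDfsA_spec g [w] [] [] (by simp) (by simp)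
  refine ⟨hn, fun x => ?_⟩
  rw [hm x]
  constructor
  · rintro (h | ⟨s, hs, hr⟩)
    · simp at h
    · simp only [List.mem_singleton] at hs
      exact hs ▸ hr
  · intro h
    exact Or.inr ⟨w, by simp, h⟩

theorem pvBfsEscape (g : PySem.Dict String (PySem.Set String)) (comp seen : List String) (j : Nat)
    (hseen : ∀ x, x ∈ seen ↔ x ∈ comp)
    (hInv : ∀ u ∈ comp.take j, ∀ v ∈ pvAdj g u, v ∈ seen)
    (s x : String) (hs : s ∈ comp) (hr : pvReach g s x) :
    x ∈ comp ∨ ∃ t ∈ comp.drop j, pvReach g t x := by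
  by_cases hsd : s ∈ comp.drop j
  · exact Or.inr ⟨s, hsd, hr⟩
  · have hst : s ∈ comp.take j := by
      have h0 : s ∈ comp.take j ++ comp.drop j := by rw [List.take_append_drop]; exact hs
      rcases List.mem_append.mp h0 with h | h
      · exact h
      · exact absurd h hsd
    have hesc := pvDfsEscape g (comp.take j) (comp.drop j) ?_ s x hst hr
    · rcases hesc with h | h
      · exact Or.inl (List.mem_of_mem_take h)
      · exact Or.inr h
    · intro u hu v hv
      have hv' : v ∈ comp := (hseen v).mp (hInv u hu v hv)
      have h0 : v ∈ comp.take j ++ comp.drop j := by rw [List.take_append_drop]; exact hv'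
      exact List.mem_append.mp h0

theorem pvBfs_spec (g : PySem.Dict String (PySem.Set String)) :
    ∀ (comp : List String) (seen : PySem.Set String) (i : Nat),
    comp.Nodup → (∀ x, x ∈ seen ↔ x ∈ comp) →
    (∀ u ∈ comp.take i, ∀ v ∈ pvAdj g u, v ∈ seen) →
    ((pvBfs g comp seen i).Nodup ∧
      ∀ x, (x ∈ pvBfs g comp seen i ↔ x ∈ comp ∨ ∃ s ∈ comp.drop i, pvReach g s x)) := by
  intro comp seen i
  fun_induction pvBfs g comp seen i with
  | case2 comp seen i hi =>
    intro hnd hseen hInv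
    refine ⟨hnd, fun x => ?_⟩
    rw [List.drop_eq_nil_of_le (le_of_not_gt hi)]
    simp
  | case1 comp seen i hi st ih =>
    intro hnd hseen hInv
    obtain ⟨nw, h1, h2, h3, h4⟩ := pvFoldStep_spec (pvAdj g comp[i]) comp seen
    have hst : st = (comp ++ nw, seen ++ nw) := by
      simp only [st, dite_eq_ite]
      exact h1
    rw [hst] at ih ⊢
    simp only at ih ⊢
    have hdisj : ∀ x ∈ nw, x ∉ comp := fun x hx h => (h2 x hx).2 ((hseen x).mpr h)
    have hnd' : (comp ++ nw).Nodup := by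
      refine List.Nodup.append hnd h4 ?_
      intro a ha hb
      exact hdisj a hb ha
    have hseen' : ∀ x, x ∈ seen ++ nw ↔ x ∈ comp ++ nw := by
      intro x
      simp only [List.mem_append]
      rw [hseen x]
    have htake : (comp ++ nw).take (i + 1) = comp.take i ++ [comp[i]] := by
      rw [List.take_append_of_le_length (by omega), ← List.take_concat_get hi, List.concat_eq_append]
    have hInv' : ∀ u ∈ (comp ++ nw).take (i + 1), ∀ v ∈ pvAdj g u, v ∈ seen ++ nw := by
      intro u hu v hv
      rw [htake] at hu
      rcases List.mem_append.mp hu with hu | hu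
      · exact List.mem_append_left _ (hInv u hu v hv)
      · simp only [List.mem_singleton] at hu
        subst hu
        rcases h3 v hv with h | h
        · exact List.mem_append_left _ h
        · exact List.mem_append_right _ h
    obtain ⟨ihn, ihm⟩ := ih hnd' hseen' hInv'
    have hdrop : comp.drop i = comp[i] :: comp.drop (i + 1) := (List.getElem_cons_drop hi).symm
    have hdrop' : (comp ++ nw).drop (i + 1) = comp.drop (i + 1) ++ nw :=
      List.drop_append_of_le_length (by omega)
    refine ⟨ihn, fun x => ?_⟩
    rw [ihm x]
    constructor
    · rintro (h | ⟨s, hs, hr⟩)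
      · rcases List.mem_append.mp h with h | h
        · exact Or.inl h
        · refine Or.inr ⟨comp[i], by rw [hdrop]; exact List.mem_cons_self .., ?_⟩
          exact Relation.ReflTransGen.single (h2 x h).1
      · rw [hdrop'] at hs
        rcases List.mem_append.mp hs with hs | hs
        · exact Or.inr ⟨s, by rw [hdrop]; exact List.mem_cons_of_mem _ hs, hr⟩
        · refine Or.inr ⟨comp[i], by rw [hdrop]; exact List.mem_cons_self .., ?_⟩
          exact Relation.ReflTransGen.head (h2 s hs).1 hr
    · rintro (h | ⟨s, hs, hr⟩)
      · exact Or.inl (List.mem_append_left _ h)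
      · rw [hdrop] at hs
        rcases List.mem_cons.mp hs with rfl | hs
        · exact pvBfsEscape g (comp ++ nw) (seen ++ nw) (i + 1) hseen' hInv' comp[i] x
            (List.mem_append_left _ (List.getElem_mem hi)) hr
        · exact Or.inr ⟨s, by rw [hdrop']; exact List.mem_append_left _ hs, hr⟩

theorem pvBfs_from (g : PySem.Dict String (PySem.Set String)) (w : String) :
    (pvBfs g [w] [w] 0).Nodup ∧ (∀ x, x ∈ pvBfs g [w] [w] 0 ↔ pvReach g w x) := by
  obtain ⟨hn, hm⟩ := pvBfs_spec g [w] [w] 0 (by simp) (fun x => Iff.rfl) (by simp)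
  refine ⟨hn, fun x => ?_⟩
  rw [hm x]
  constructor
  · rintro (h | ⟨s, hs, hr⟩)
    · simp only [List.mem_singleton] at h
      exact h ▸ Relation.ReflTransGen.refl
    · simp only [List.drop_zero, List.mem_singleton] at hs
      exact hs ▸ hr
  · intro h
    exact Or.inr ⟨w, by simp, h⟩

def pvSym (g : PySem.Dict String (PySem.Set String)) : Prop :=
  ∀ a b, b ∈ pvAdj g a → a ∈ pvAdj g b

theorem pvReach_symm (g : PySem.Dict String (PySem.Set String)) (hsym : pvSym g)
    {a b : String} (h : pvReach g a b) : pvReach g b a := by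
  induction h with
  | refl => exact Relation.ReflTransGen.refl
  | tail hstep hlast ih =>
    exact Relation.ReflTransGen.trans (Relation.ReflTransGen.single (hsym _ _ hlast)) ih

theorem pvReach_congr (g : PySem.Dict String (PySem.Set String)) (hsym : pvSym g)
    {w k : String} (hwk : pvReach g w k) (x : String) : (pvReach g k x ↔ pvReach g w x) :=
  ⟨fun h => Relation.ReflTransGen.trans hwk h,
   fun h => Relation.ReflTransGen.trans (pvReach_symm g hsym hwk) h⟩

-- membership in the adjacency after one addEdge
theorem pvMem_adj_addEdge (g : PySem.Dict String (PySem.Set String)) (a b x y : String) :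
    y ∈ pvAdj (pvAddEdge g a b) x ↔ y ∈ pvAdj g x ∨ (x = a ∧ y = b) ∨ (x = b ∧ y = a) := by
  unfold pvAddEdge pvAdj
  by_cases hxb : x = b <;> by_cases hxa : x = a
  · subst hxb
    rw [PySem.Dict.getD_modify, if_pos rfl, PySem.Dict.getD_modify]
    subst hxa
    simp [PySem.Set.mem_add]
    try tauto
  · subst hxb
    rw [PySem.Dict.getD_modify, if_pos rfl, PySem.Dict.getD_modify, if_neg hxa]
    simp [PySem.Set.mem_add]
    try tauto
  · subst hxa
    rw [PySem.Dict.getD_modify, if_neg hxb, PySem.Dict.getD_modify, if_pos rfl]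
    simp [PySem.Set.mem_add]
    try tauto
  · rw [PySem.Dict.getD_modify, if_neg hxb, PySem.Dict.getD_modify, if_neg hxa]
    simp [hxa, hxb]

theorem pvSym_addEdge (g : PySem.Dict String (PySem.Set String)) (a b : String)
    (h : pvSym g) : pvSym (pvAddEdge g a b) := by
  intro x y hy
  rw [pvMem_adj_addEdge] at hy ⊢
  rcases hy with hy | ⟨rfl, rfl⟩ | ⟨rfl, rfl⟩
  · exact Or.inl (h x y hy)
  · tauto
  · tauto

theorem pvFoldPreserve {γ β : Type} (P : γ → Prop) (f : γ → β → γ)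
    (hf : ∀ g a, P g → P (f g a)) :
    ∀ (l : List β) (g : γ), P g → P (l.foldl f g) := by
  intro l
  induction l with
  | nil => exact fun g h => h
  | cons a rest ih => exact fun g h => ih (f g a) (hf g a h)

theorem pvBuildGraph_sym (lexicon : List (String × List String))
    (synonym_pairs : List (String × String)) : pvSym (pvBuildGraph lexicon synonym_pairs) := by
  unfold pvBuildGraph
  apply pvFoldPreserve pvSym _ (fun g p h => pvSym_addEdge g p.1 p.2 h)
  apply pvFoldPreserve pvSym
    (fun g (p : String × List String) => p.2.foldl (fun g s => pvAddEdge g p.1 s) g)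
    (fun g p h => pvFoldPreserve pvSym _ (fun g s h => pvSym_addEdge g p.1 s h) p.2 g h)
  intro x y hy
  simp [pvAdj, PySem.Dict.getD_empty] at hy

theorem pvFilterNeLen (l : List String) (a : String) (ha : a ∈ l) (h : l.Nodup) :
    (l.filter (fun y => !y == a)).length = l.length - 1 := by
  have h1 := List.length_eq_length_filter_add (f := fun y => !y == a) (l := l)
  have h2 : l.filter (fun x => !(!x == a)) = l.filter (fun x => x == a) := by
    apply List.filter_congr; intro x _; simp
  rw [h2] at h1
  have h3 : (l.filter (fun x => x == a)).length = l.count a := by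
    rw [List.count_eq_countP, List.countP_eq_length_filter]
  have h4 : l.count a = 1 := List.count_eq_one_of_mem h ha
  omega

theorem pvNodupKeys_addEdge (g : PySem.Dict String (PySem.Set String)) (a b : String)
    (h : g.keys.Nodup) : (pvAddEdge g a b).keys.Nodup := by
  unfold pvAddEdge
  rw [PySem.Dict.keys_modify]
  apply PySem.Dict.nodup_keys_insert
  rw [PySem.Dict.keys_modify]
  exact PySem.Dict.nodup_keys_insert _ _ _ h

theorem pvBuildGraph_nodup_keys (lexicon : List (String × List String))
    (synonym_pairs : List (String × String)) : (pvBuildGraph lexicon synonym_pairs).keys.Nodup := by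
  unfold pvBuildGraph
  apply pvFoldPreserve (fun g => g.keys.Nodup) _ (fun g p h => pvNodupKeys_addEdge g p.1 p.2 h)
  apply pvFoldPreserve (fun g => g.keys.Nodup)
    (fun g (p : String × List String) => p.2.foldl (fun g s => pvAddEdge g p.1 s) g)
    (fun g p h => pvFoldPreserve _ _ (fun g s h => pvNodupKeys_addEdge g p.1 s h) p.2 g h)
  exact PySem.Dict.nodup_keys_empty

theorem pvBfs_len_congr (g : PySem.Dict String (PySem.Set String)) (hsym : pvSym g)
    {w k : String} (hk : k ∈ pvBfs g [w] [w] 0) :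
    (pvBfs g [k] [k] 0).length = (pvBfs g [w] [w] 0).length := by
  obtain ⟨hnw, hmw⟩ := pvBfs_from g w
  obtain ⟨hnk, hmk⟩ := pvBfs_from g k
  have hwk : pvReach g w k := (hmw k).mp hk
  exact ((List.perm_ext_iff_of_nodup hnk hnw).mpr
    (fun x => by rw [hmk, hmw, pvReach_congr g hsym hwk])).length_eq

theorem pvDfs_len_eq_bfs (g : PySem.Dict String (PySem.Set String)) (w : String) :
    (pvDfsA g [w] [] []).1.length = (pvBfs g [w] [w] 0).length := by
  obtain ⟨hnd, hmd⟩ := pvDfs_from g w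
  obtain ⟨hnb, hmb⟩ := pvBfs_from g w
  exact ((List.perm_ext_iff_of_nodup hnd hnb).mpr (fun x => by rw [hmd, hmb])).length_eq

theorem pvGetD_foldl_insert_const (l : List String) (cs : PySem.Dict String Int) (c : Int)
    (k : String) :
    (l.foldl (fun d v => d.insert v c) cs).getD k 0 = if k ∈ l then c else cs.getD k 0 := by
  induction l generalizing cs with
  | nil => simp
  | cons v rest ih =>
    simp only [List.foldl_cons]
    rw [ih]
    rcases eq_or_ne k v with rfl | hkv
    · by_cases hk : k ∈ rest <;> simp [hk, PySem.Dict.getD_insert]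
    · by_cases hk : k ∈ rest <;> simp [hk, hkv, PySem.Dict.getD_insert]

theorem pvContains_foldl_insert_const (l : List String) (cs : PySem.Dict String Int) (c : Int)
    (k : String) :
    ((l.foldl (fun d v => d.insert v c) cs).contains k = true) ↔ (k ∈ l ∨ cs.contains k = true) := by
  induction l generalizing cs with
  | nil => simp
  | cons v rest ih =>
    simp only [List.foldl_cons]
    rw [ih]
    rw [PySem.Dict.contains_insert]
    rcases eq_or_ne k v with rfl | hkv
    · simp
    · simp [hkv]

theorem pvSizes_spec (g : PySem.Dict String (PySem.Set String)) (hsym : pvSym g) :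
    ∀ (l : List String) (cs : PySem.Dict String Int),
    (∀ k, cs.contains k = true → cs.getD k 0 = ((pvBfs g [k] [k] 0).length : Int)) →
    (∀ k, (l.foldl (fun cs w =>
        if cs.contains w then cs
        else (pvBfs g [w] [w] 0).foldl (fun cs v => cs.insert v (((pvBfs g [w] [w] 0).length : Int))) cs) cs).contains k = true →
      (l.foldl (fun cs w =>
        if cs.contains w then cs
        else (pvBfs g [w] [w] 0).foldl (fun cs v => cs.insert v (((pvBfs g [w] [w] 0).length : Int))) cs) cs).getD k 0
        = ((pvBfs g [k] [k] 0).length : Int))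
    ∧ (∀ k ∈ l, (l.foldl (fun cs w =>
        if cs.contains w then cs
        else (pvBfs g [w] [w] 0).foldl (fun cs v => cs.insert v (((pvBfs g [w] [w] 0).length : Int))) cs) cs).contains k = true) := by
  intro l
  induction l with
  | nil => exact fun cs h => ⟨h, by simp⟩
  | cons w rest ih =>
    intro cs hcs
    simp only [List.foldl_cons]
    have hstep : ∀ k, (if cs.contains w then cs
        else (pvBfs g [w] [w] 0).foldl (fun cs v => cs.insert v (((pvBfs g [w] [w] 0).length : Int))) cs).contains k = true →
        (if cs.contains w then cs
        else (pvBfs g [w] [w] 0).foldl (fun cs v => cs.insert v (((pvBfs g [w] [w] 0).length : Int))) cs).getD k 0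
        = ((pvBfs g [k] [k] 0).length : Int) := by
      intro k
      by_cases hw : cs.contains w
      · rw [if_pos hw]
        exact hcs k
      · rw [if_neg hw]
        intro hk
        rw [pvGetD_foldl_insert_const]
        by_cases hkcomp : k ∈ pvBfs g [w] [w] 0
        · rw [if_pos hkcomp, pvBfs_len_congr g hsym hkcomp]
        · rw [if_neg hkcomp]
          rcases (pvContains_foldl_insert_const _ _ _ _).mp hk with h | h
          · exact absurd h hkcomp
          · exact hcs k h
    obtain ⟨ih1, ih2⟩ := ih _ hstep
    refine ⟨ih1, fun k hkl => ?_⟩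
    rcases List.mem_cons.mp hkl with rfl | hkl
    · -- k = w : w is bound after its own step, and stays bound
      apply pvFoldPreserve (fun (d : PySem.Dict String Int) => d.contains k = true)
        _ (fun d a h => ?_) rest
      · by_cases hw : cs.contains k
        · rw [if_pos hw]; exact hw
        · rw [if_neg hw]
          refine (pvContains_foldl_insert_const _ _ _ _).mpr (Or.inl ?_)
          exact ((pvBfs_from g k).2 k).mpr Relation.ReflTransGen.refl
      · dsimp only
        by_cases ha : d.contains a
        · rw [if_pos ha]; exact h
        · rw [if_neg ha]
          exact (pvContains_foldl_insert_const _ _ _ _).mpr (Or.inr h)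
    · exact ih2 k hkl

theorem pvMain (lexicon : List (String × List String)) (synonym_pairs : List (String × String)) :
    calculate_synonyms lexicon synonym_pairs = calculate_synonyms_alt lexicon synonym_pairs := by
  have hsym := pvBuildGraph_sym lexicon synonym_pairs
  have hkeys := pvBuildGraph_nodup_keys lexicon synonym_pairs
  simp only [calculate_synonyms, calculate_synonyms_alt]
  set g := pvBuildGraph lexicon synonym_pairs with hg
  obtain ⟨hs1, hs2⟩ := pvSizes_spec g hsym g.keys PySem.Dict.empty
    (by intro k h; rw [PySem.Dict.contains_empty] at h; exact absurd h (by simp))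
  have hA := PySem.Dict.items_foldl_insert_fresh g.keys (fun w => w)
    (fun w => ((PySem.Set.discard (pvDfsA g [w] [] []).2 w).length : Int)) PySem.Dict.empty
    (fun a _ => PySem.Dict.contains_empty a) (by simpa using hkeys)
  have hB := PySem.Dict.items_foldl_insert_fresh g.keys (fun w => w)
    (fun w => ((g.keys.foldl (fun cs w =>
        if cs.contains w then cs
        else (pvBfs g [w] [w] 0).foldl (fun cs v => cs.insert v (((pvBfs g [w] [w] 0).length : Int))) cs) PySem.Dict.empty).getD w 0 - 1)) PySem.Dict.empty
    (fun a _ => PySem.Dict.contains_empty a) (by simpa using hkeys)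
  rw [hA, hB]
  simp only [List.nil_append]
  apply List.map_congr_left
  intro w hw
  simp only [Prod.mk.injEq, true_and]
  rw [pvDfsA_snd g [w] [] [] rfl]
  obtain ⟨hnV, hmV⟩ := pvDfs_from g w
  have hwV : w ∈ (pvDfsA g [w] [] []).1 := (hmV w).mpr Relation.ReflTransGen.refl
  simp only [PySem.Set.discard]
  rw [pvFilterNeLen _ _ hwV hnV, pvDfs_len_eq_bfs g w, hs1 w (hs2 w hw)]
  have hpos : 0 < (pvBfs g [w] [w] 0).length :=
    List.length_pos_of_mem (((pvBfs_from g w).2 w).mpr Relation.ReflTransGen.refl)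
  omega

-- ===== VERDICT (by name: the statement is the Claim_ definition above) =====
theorem calculate_synonyms_spec : Claim_equal_calculate_synonyms := by
  intro lexicon synonym_pairs _
  unfold Spec_calculate_synonyms
  exact pvMain lexicon synonym_pairs
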